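-- pv_equiv track=rewrite | github.com/ahmetdurmaz47/ENS491-2-IRP-PD-Project | heuristic_main.py | route_structure_ok
-- ===== SOURCE A (Python) =====
-- from typing import Dict, List, Tuple
--
-- def route_structure_ok(route: List[int], data) -> bool:
--     if len(route) < 2 or route[0] != 0 or route[-1] != 0:
--         return False
--     seen = set()
--     prev = None
--     for node in route[1:-1]:
--         if node == 0:
--             return False
--         if node == prev:
--             return False
--         if node in seen:
--             return False
--         if node not in data["N"]:
--             return False
--         seen.add(node)
--         prev = node
--     return True
-- ===== SOURCE B (Python) =====
-- def route_structure_ok(route, data) -> bool: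
--     if len(route) < 2 or route[0] != 0 or route[-1] != 0:
--         return False
--     middle = route[1:-1]
--     s = sorted(middle)
--     if any(a == b for a, b in zip(s, s[1:])):
--         return False
--     return all(node != 0 and node in data["N"] for node in middle)
-- ===== Notes on version B (the rewrite author's own statement) =====
-- stated objective: alternative
-- what changed: Duplicate detection is done by sorting the interior segment and scanning adjacent pairs of the sorted copy (sort-then-scan) instead of A's incremental hash-set membership inside one interleaved early-exit loop; the nonzero/membership checks become a separate all(...) pass.
import Mathlib
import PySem

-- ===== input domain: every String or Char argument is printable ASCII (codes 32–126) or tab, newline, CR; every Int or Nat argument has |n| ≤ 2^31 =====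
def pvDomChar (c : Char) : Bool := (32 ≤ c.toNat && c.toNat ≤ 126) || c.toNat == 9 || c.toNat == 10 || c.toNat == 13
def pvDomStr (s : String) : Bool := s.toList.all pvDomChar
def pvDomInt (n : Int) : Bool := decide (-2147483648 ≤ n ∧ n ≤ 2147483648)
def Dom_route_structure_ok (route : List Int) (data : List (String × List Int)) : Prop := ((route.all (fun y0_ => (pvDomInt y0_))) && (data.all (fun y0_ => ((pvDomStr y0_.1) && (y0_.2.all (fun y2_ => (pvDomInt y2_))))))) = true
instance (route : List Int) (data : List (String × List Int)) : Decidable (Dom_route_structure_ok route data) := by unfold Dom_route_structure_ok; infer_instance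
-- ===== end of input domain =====

-- B sorts the interior segment and detects duplicates by scanning adjacent pairs of the
-- sorted copy, then does the nonzero/membership checks in one separate pass (alternative).

-- ===== PORT A =====
-- A's for-loop over route[1:-1]; n? is data["N"] (none = KeyError, excluded by Pre_).
def pvALoop (n? : Option (List Int)) : List Int → PySem.Set Int → Option Int → Bool
  | [], _, _ => true
  | node :: rest, seen, prev =>
    if node = 0 then false
    else if some node = prev then false
    else if PySem.Set.contains seen node then false
    else match n? with
      | none => false   -- Python raises KeyError here; outside Pre_
      | some N => if N.contains node then pvALoop n? rest (PySem.Set.add seen node) (some node)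
                  else false

def route_structure_ok (route : List Int) (data : List (String × List Int)) : Bool :=
  if route.length < 2 ∨ PySem.List.pyGetD route 0 0 ≠ 0 ∨ PySem.List.pyGetD route (-1) 0 ≠ 0 then
    false
  else
    pvALoop ((PySem.Dict.mk data).get? "N")
      (PySem.List.slice route (some 1) (some (-1))) PySem.Set.empty none

-- ===== PORT B =====
-- sort-then-scan: s = sorted(middle); any adjacent equal pair in s ⇒ duplicate ⇒ False;
-- then all(node != 0 and node in data['N'] for node in middle); n? = data["N"] (none = KeyError, outside Pre_).
def route_structure_ok_alt (route : List Int) (data : List (String × List Int)) : Bool :=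
  if route.length < 2 ∨ PySem.List.pyGetD route 0 0 ≠ 0 ∨ PySem.List.pyGetD route (-1) 0 ≠ 0 then
    false
  else
    let middle := PySem.List.slice route (some 1) (some (-1))
    let s := PySem.List.sorted middle (fun x => x) false
    if (s.zip s.tail).any (fun p => p.1 == p.2) then false
    else
      middle.all (fun node =>
        node ≠ 0 && (match (PySem.Dict.mk data).get? "N" with
                     | none => false   -- Python raises KeyError here; outside Pre_
                     | some N => N.contains node))

-- ===== PRECONDITION & SPEC =====
-- Pre_ excludes exactly the inputs where A raises KeyError: data has no key "N" while the
-- loop body is reached (route of length ≥ 3 passing the depot guard with route[1] ≠ 0).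
def Pre_route_structure_ok (route : List Int) (data : List (String × List Int)) : Prop :=
  (PySem.Dict.mk data).get? "N" ≠ none ∨ route.length < 3 ∨
  PySem.List.pyGetD route 0 0 ≠ 0 ∨ PySem.List.pyGetD route (-1) 0 ≠ 0 ∨
  PySem.List.pyGetD route 1 0 = 0
instance (route : List Int) (data : List (String × List Int)) : Decidable (Pre_route_structure_ok route data) := by unfold Pre_route_structure_ok; infer_instance

def pvWitness_route_structure_ok : List Int × (List (String × List Int)) :=
  ([0, 1, 2, 0], [("N", [1, 2, 3])])

def Spec_route_structure_ok (route : List Int) (data : List (String × List Int)) (out : Bool) : Prop := out = route_structure_ok_alt route data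
instance (route : List Int) (data : List (String × List Int)) (out : Bool) : Decidable (Spec_route_structure_ok route data out) := by unfold Spec_route_structure_ok; infer_instance

-- ===== CLAIM (what is proved, stated in full; the proofs are below) =====
def Claim_equal_route_structure_ok : Prop := ∀ (route : List Int) (data : List (String × List Int)), Dom_route_structure_ok route data → Pre_route_structure_ok route data → Spec_route_structure_ok route data (route_structure_ok route data)

-- ===== LEMMAS AND PROOFS =====

-- route[1:-1] is tail-then-dropLast, for every list.
theorem pv_slice_one_neg_one (xs : List Int) :
    PySem.List.slice xs (some 1) (some (-1)) = xs.tail.dropLast := by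
  cases xs with
  | nil => rfl
  | cons x t =>
    have h0 : ¬((t.length:Int) < 0) := by omega
    simp [PySem.List.slice, PySem.List.clampIdx, List.dropLast_eq_take, h0]

-- characterisation of A's loop (invariant: the previous node is already in seen).
theorem pv_aLoop_true_iff (N : List Int) (m : List Int) : ∀ (seen : PySem.Set Int)
    (prev : Option Int), (∀ p, prev = some p → p ∈ seen) →
    (pvALoop (some N) m seen prev = true ↔
      (m.Nodup ∧ ∀ x ∈ m, x ∉ seen ∧ x ≠ 0 ∧ N.contains x = true)) := by
  induction m with
  | nil => intro seen prev _; simp [pvALoop]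
  | cons node rest ih =>
    intro seen prev hprev
    rw [pvALoop]
    by_cases h0 : node = 0
    · simp [h0]
    · rw [if_neg h0]
      by_cases hp : some node = prev
      · rw [if_pos hp]
        have hmem : node ∈ seen := hprev node hp.symm
        simp only [Bool.false_eq_true, false_iff]
        rintro ⟨_, h⟩
        exact (h node (by simp)).1 hmem
      · rw [if_neg hp]
        by_cases hs : node ∈ seen
        · rw [if_pos (by simpa [PySem.Set.contains] using hs)]
          simp only [Bool.false_eq_true, false_iff]
          rintro ⟨_, h⟩
          exact (h node (by simp)).1 hs
        · rw [if_neg (by simpa [PySem.Set.contains] using hs)]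
          by_cases hN : N.contains node = true
          · rw [if_pos hN]
            rw [ih (PySem.Set.add seen node) (some node)
              (fun p hp => by cases hp; exact (PySem.Set.mem_add seen node _).mpr (Or.inr rfl))]
            simp only [List.nodup_cons, List.mem_cons, PySem.Set.mem_add]
            constructor
            · rintro ⟨hnd, h⟩
              refine ⟨⟨fun hm => (h node hm).1 (Or.inr rfl), hnd⟩, fun y hy => ?_⟩
              rcases hy with rfl | hy
              · exact ⟨hs, h0, hN⟩
              · have := h y hy
                exact ⟨fun hys => this.1 (Or.inl hys), this.2.1, this.2.2⟩
            · rintro ⟨⟨hnm, hnd⟩, h⟩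
              refine ⟨hnd, fun y hy => ?_⟩
              have hyr := h y (Or.inr hy)
              refine ⟨fun hc => ?_, hyr.2.1, hyr.2.2⟩
              rcases hc with hys | rfl
              · exact hyr.1 hys
              · exact hnm hy
          · rw [if_neg hN]
            simp only [Bool.false_eq_true, false_iff]
            rintro ⟨_, h⟩
            exact hN (h node (by simp)).2.2

-- On a ≤-sorted list, "no adjacent pair is equal" is exactly Nodup.
theorem pv_adj_nodup : ∀ (s : List Int), s.Pairwise (· ≤ ·) →
    (((s.zip s.tail).any (fun p => p.1 == p.2)) = false ↔ s.Nodup) := by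
  intro s
  induction s with
  | nil => intro _; simp
  | cons a t ih =>
    intro hp
    cases t with
    | nil => simp
    | cons b u =>
      have hp' : (b :: u).Pairwise (· ≤ ·) := hp.tail
      have hab : a ≤ b := (List.pairwise_cons.mp hp).1 b (by simp)
      have hrest := ih hp'
      simp only [List.tail_cons, List.zip_cons_cons, List.any_cons, Bool.or_eq_false_iff,
        beq_eq_false_iff_ne, ne_eq, List.nodup_cons] at hrest ⊢
      constructor
      · rintro ⟨hne, hzip⟩
        refine ⟨?_, hrest.mp hzip⟩
        intro hmem
        rcases List.mem_cons.mp hmem with rfl | hmu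
        · exact hne rfl
        · have hbu : b ≤ a := (List.pairwise_cons.mp hp').1 a hmu
          exact hne (le_antisymm hab hbu)
      · rintro ⟨hnm, hnd⟩
        exact ⟨fun h => hnm (h ▸ List.mem_cons_self), hrest.mpr hnd⟩

-- ===== VERDICT (by name: the statement is the Claim_ definition above) =====
theorem route_structure_ok_spec : Claim_equal_route_structure_ok := by
  intro route data _ hpre
  unfold Spec_route_structure_ok route_structure_ok route_structure_ok_alt
  by_cases hg : route.length < 2 ∨ PySem.List.pyGetD route 0 0 ≠ 0 ∨
      PySem.List.pyGetD route (-1) 0 ≠ 0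
  · rw [if_pos hg, if_pos hg]
  · rw [if_neg hg, if_neg hg]
    push Not at hg
    obtain ⟨hlen, h0, hlast⟩ := hg
    rw [pv_slice_one_neg_one]
    set mid := route.tail.dropLast with hmid
    set s := PySem.List.sorted mid (fun x => x) false with hs
    have hperm : s.Perm mid := PySem.List.sorted_perm mid (fun x => x) false
    have hpair : s.Pairwise (· ≤ ·) := by
      simpa using PySem.List.sorted_pairwise (xs := mid) (key := fun x => x)
    have hdup := pv_adj_nodup s hpair
    cases hN : (PySem.Dict.mk data).get? "N" with
    | some N =>
      apply Bool.coe_iff_coe.mp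
      rw [pv_aLoop_true_iff N mid PySem.Set.empty none (by intro p h; cases h)]
      by_cases hz : ((s.zip s.tail).any (fun p => p.1 == p.2)) = true
      · rw [if_pos hz]
        simp only [Bool.false_eq_true, iff_false]
        rintro ⟨hnd, _⟩
        have hzf : ((s.zip s.tail).any (fun p => p.1 == p.2)) = false :=
          hdup.mpr (hperm.nodup_iff.mpr hnd)
        simp [hz] at hzf
      · rw [if_neg hz]
        have hzf : ((s.zip s.tail).any (fun p => p.1 == p.2)) = false :=
          Bool.eq_false_iff.mpr hz
        have hndm : mid.Nodup := hperm.nodup_iff.mp (hdup.mp hzf)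
        simp only [List.all_eq_true, Bool.and_eq_true, decide_eq_true_eq, ne_eq]
        constructor
        · rintro ⟨_, h⟩
          intro x hx
          exact ⟨(h x hx).2.1, (h x hx).2.2⟩
        · intro h
          refine ⟨hndm, fun x hx => ?_⟩
          exact ⟨by simp [PySem.Set.empty], (h x hx).1, (h x hx).2⟩
    | none =>
      have hmidnil_of : route.length < 3 → mid = [] := by
        intro h3
        have : mid.length = 0 := by
          simp only [hmid, List.length_dropLast, List.length_tail]; omega
        exact List.eq_nil_of_length_eq_zero this
      rcases hpre with h1 | h2 | h3 | h4 | h5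
      · exact absurd hN h1
      · rw [hmidnil_of h2]; rfl
      · exact absurd h0 h3
      · exact absurd hlast h4
      · by_cases h3 : route.length < 3
        · rw [hmidnil_of h3]; rfl
        · match route, hlen, h3 with
          | a :: b :: c :: t, _, _ =>
            have hb : b = 0 := by
              have : PySem.List.pyGetD (a :: b :: c :: t) 1 0 = b := by
                simpa using PySem.List.pyGetD_natCast (a :: b :: c :: t) (n := 1) (d := 0)
              rw [this] at h5; exact h5
            have hmc : mid = 0 :: (c :: t).dropLast := by
              simp only [hmid, List.tail_cons, List.dropLast_cons₂, hb]
            rw [hmc]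
            rw [pvALoop]
            rw [if_pos rfl]
            by_cases hzz : (((PySem.List.sorted (0 :: (c :: t).dropLast) (fun x => x) false).zip
                (PySem.List.sorted (0 :: (c :: t).dropLast) (fun x => x) false).tail).any
                (fun p => p.1 == p.2)) = true
            · simp [hzz]
            · simp [Bool.eq_false_iff.mpr hzz]
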